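-- pv_equiv track=rewrite | github.com/yeonjung77/llmfinetuning | inference_pipeline.py | extract_aspect_sentences
-- ===== SOURCE A (Python) =====
-- def extract_aspect_sentences(reviews, aspect_keywords):
--     """
--     리뷰 전체 텍스트에서 각 aspect마다 관련 있는 문장을 추출
--     """
--     sentences = reviews.replace("\n", " ").split(".")
--
--     result = {}
--     for aspect, keywords in aspect_keywords.items():
--         aspect_sents = [
--             s.strip()
--             for s in sentences
--             if any(k in s for k in keywords)
--         ]
--
--         # 문장 없으면 "의견이 엇갈림"
--         if len(aspect_sents) == 0:
--             result[aspect] = "관련 의견이 다양합니다."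
--         else:
--             result[aspect] = " ".join(aspect_sents)[:300]  # 최대 길이 제한
--
--     return result
-- ===== SOURCE B (Python) =====
-- def extract_aspect_sentences(reviews, aspect_keywords):
--     # Inverted-index approach: build, once, a postings dict mapping each distinct
--     # keyword to the sorted sentence indices containing it; each aspect is then
--     # answered by a set-union of its keywords' postings, no rescans of the text.
--     sentences = reviews.replace("\n", " ").split(".")
--     stripped = [s.strip() for s in sentences]
--     distinct = list(dict.fromkeys(k for _, kws in aspect_keywords.items() for k in kws))
--     postings = {k: [j for j, s in enumerate(sentences) if k in s] for k in distinct}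
--     result = {}
--     for aspect, keywords in aspect_keywords.items():
--         hit = sorted(set().union(*(postings[k] for k in keywords)))
--         if hit:
--             result[aspect] = " ".join(stripped[j] for j in hit)[:300]
--         else:
--             result[aspect] = "관련 의견이 다양합니다."
--     return result
-- ===== Notes on version B (the rewrite author's own statement) =====
-- stated objective: alternative
-- what changed: B builds an inverted index once (a postings dict from each distinct keyword to the sorted indices of sentences containing it) and answers each aspect by a set-union of its keywords' postings followed by a sort, instead of A's per-aspect rescan of all sentences with any(); Pre_ excludes association lists with repeated aspect names, which correspond to no Python dict argument.
import Mathlib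
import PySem

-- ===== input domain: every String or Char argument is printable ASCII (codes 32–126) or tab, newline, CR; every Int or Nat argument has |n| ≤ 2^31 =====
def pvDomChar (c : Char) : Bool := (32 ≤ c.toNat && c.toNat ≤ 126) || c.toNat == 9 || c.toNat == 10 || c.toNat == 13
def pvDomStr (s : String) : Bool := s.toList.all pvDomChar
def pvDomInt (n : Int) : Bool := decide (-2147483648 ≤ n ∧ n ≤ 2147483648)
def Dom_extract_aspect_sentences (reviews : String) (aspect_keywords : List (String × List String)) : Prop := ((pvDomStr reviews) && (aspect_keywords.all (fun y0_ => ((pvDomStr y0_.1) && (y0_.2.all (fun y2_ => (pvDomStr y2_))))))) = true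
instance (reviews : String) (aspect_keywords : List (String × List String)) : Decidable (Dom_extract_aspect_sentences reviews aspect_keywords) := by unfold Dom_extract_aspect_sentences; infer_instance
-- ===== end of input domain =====

-- B answers each aspect from a precomputed inverted index (distinct keyword -> sentence-index
-- postings, merged by set union and sorted) instead of A's per-aspect rescan of the sentences.


-- ===== PORT A =====
-- reviews.replace("\n", " ").split(".") — '.' is a fixed non-empty separator, so the
-- Chars.splitOn form of str.split is exact here.
def extract_aspect_sentences (reviews : String) (aspect_keywords : List (String × List String)) : List (String × String) :=
  let sentences : List String :=
    (PySem.Chars.splitOn (PySem.Str.replace reviews "\n" " ").toList ".".toList).map String.ofList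
  let result : PySem.Dict String String :=
    aspect_keywords.foldl (fun result p =>
      let aspect_sents := (sentences.filter (fun s => p.2.any (fun k => PySem.Str.isIn k s))).map PySem.Str.strip
      if aspect_sents.length = 0 then
        result.insert p.1 "관련 의견이 다양합니다."
      else
        result.insert p.1 (PySem.Str.slice (PySem.Str.join " " aspect_sents) none (some 300)))
      PySem.Dict.empty
  result.items

-- ===== PORT B =====
-- Source B: postings = inverted index keyword -> [j for j,s in enumerate(sentences) if k in s];
-- each aspect: sorted(set().union(*(postings[k] for k in keywords))), then join stripped[j].
def extract_aspect_sentences_alt (reviews : String) (aspect_keywords : List (String × List String)) : List (String × String) :=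
  let sentences : List String :=
    (PySem.Chars.splitOn (PySem.Str.replace reviews "\n" " ").toList ".".toList).map String.ofList
  let stripped : List String := sentences.map PySem.Str.strip
  let distinct : List String := PySem.List.dedup (aspect_keywords.flatMap (fun p => p.2))
  let postings : PySem.Dict String (List Int) :=
    distinct.foldl (fun d k =>
      d.insert k (((PySem.List.enumerate sentences 0).filter
        (fun js => PySem.Str.isIn k js.2)).map (fun js => js.1))) PySem.Dict.empty
  let result : PySem.Dict String String :=
    aspect_keywords.foldl (fun r p =>
      let hit : List Int :=
        PySem.List.sorted
          (p.2.foldl (fun (u : PySem.Set Int) k => PySem.Set.update u (postings.getD k []))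
            PySem.Set.empty)
          (fun x => x) false
      r.insert p.1
        (if hit = [] then "관련 의견이 다양합니다."
         else PySem.Str.slice
           (PySem.Str.join " " (hit.map (fun j => PySem.List.pyGetD stripped j "")))
           none (some 300)))
      PySem.Dict.empty
  result.items

-- ===== PRECONDITION & SPEC =====
-- Pre_ excludes lists whose aspect names repeat: a Python dict argument cannot hold
-- duplicate keys (it collapses them before A ever runs), so the ports' behaviour on
-- such lists corresponds to no Python input and is accidental.
def Pre_extract_aspect_sentences (_reviews : String) (aspect_keywords : List (String × List String)) : Prop :=
  (aspect_keywords.map Prod.fst).Nodup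
instance (reviews : String) (aspect_keywords : List (String × List String)) : Decidable (Pre_extract_aspect_sentences reviews aspect_keywords) := by unfold Pre_extract_aspect_sentences; infer_instance
def pvWitness_extract_aspect_sentences : String × (List (String × List String)) :=
  ("Good service. bad price.\nok", [("service", ["service"]), ("price", ["price", "cost"])])
def Spec_extract_aspect_sentences (reviews : String) (aspect_keywords : List (String × List String)) (out : List (String × String)) : Prop := out = extract_aspect_sentences_alt reviews aspect_keywords
instance (reviews : String) (aspect_keywords : List (String × List String)) (out : List (String × String)) : Decidable (Spec_extract_aspect_sentences reviews aspect_keywords out) := by unfold Spec_extract_aspect_sentences; infer_instance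

-- ===== CLAIM (what is proved, stated in full; the proofs are below) =====
def Claim_equal_extract_aspect_sentences : Prop := ∀ (reviews : String) (aspect_keywords : List (String × List String)), Dom_extract_aspect_sentences reviews aspect_keywords → Pre_extract_aspect_sentences reviews aspect_keywords → Spec_extract_aspect_sentences reviews aspect_keywords (extract_aspect_sentences reviews aspect_keywords)

-- ===== LEMMAS AND PROOFS =====

theorem pv_items_empty {κ ν : Type} [BEq κ] : (PySem.Dict.empty : PySem.Dict κ ν).items = [] := rfl

-- enumerate-then-filter-on-snd-then-map-snd is filter-then-map on the list itself
theorem pv_enum_filter {γ : Type} (q : String → Bool) (f : String → γ) :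
    ∀ (xs : List String) (s : Int),
    ((PySem.List.enumerate xs s).filter (fun js => q js.2)).map (fun js => f js.2)
      = (xs.filter q).map f := by
  intro xs
  induction xs with
  | nil => intro s; simp [PySem.List.enumerate_nil]
  | cons x t ih =>
    intro s
    rw [PySem.List.enumerate_cons]
    by_cases hq : q x <;> simp [hq, ih (s + 1)]

-- lookup in the postings dict built over the nodup key list `distinct`
theorem pv_postings_getD (distinct : List String) (v : String → List Int)
    (h : distinct.Nodup) (k : String) (hk : k ∈ distinct) :
    (distinct.foldl (fun d k => d.insert k (v k)) PySem.Dict.empty).getD k [] = v k := by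
  have hitems : (distinct.foldl (fun d k => d.insert k (v k)) PySem.Dict.empty).items
      = [] ++ distinct.map (fun a => (a, v a)) :=
    PySem.Dict.items_foldl_insert_fresh distinct (fun x => x) v PySem.Dict.empty
      (by intro a _; simp) (by simpa using h)
  apply PySem.Dict.getD_of_mem_items
  · rw [hitems]
    simp only [List.nil_append, List.mem_map]
    exact ⟨k, hk, rfl⟩
  · simp only [PySem.Dict.keys, hitems, List.nil_append, List.map_map]
    simpa [Function.comp_def] using h

-- membership in the folded union of posting sets
theorem pv_union_mem (g : String → List Int) (ks : List String) (u0 : PySem.Set Int) (j : Int) :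
    j ∈ ks.foldl (fun (u : PySem.Set Int) k => PySem.Set.update u (g k)) u0
      ↔ j ∈ u0 ∨ ∃ k ∈ ks, j ∈ g k := by
  induction ks generalizing u0 with
  | nil => simp
  | cons k t ih =>
    rw [List.foldl_cons, ih, PySem.Set.mem_update]
    simp only [List.exists_mem_cons_iff]
    tauto

-- the folded union of posting sets is Nodup
theorem pv_union_nodup (g : String → List Int) (ks : List String) (u0 : PySem.Set Int)
    (h : u0.Nodup) :
    (ks.foldl (fun (u : PySem.Set Int) k => PySem.Set.update u (g k)) u0).Nodup := by
  induction ks generalizing u0 with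
  | nil => exact h
  | cons k t ih => exact ih _ (PySem.Set.nodup_update _ _ h)

-- per-aspect equality: sorted union of postings, rendered through `stripped`, is A's list
theorem pv_aspect_eq (sentences : List String) (kws : List String) :
    (PySem.List.sorted
        (kws.foldl (fun (u : PySem.Set Int) k =>
          PySem.Set.update u (((PySem.List.enumerate sentences 0).filter
            (fun js => PySem.Str.isIn k js.2)).map (fun js => js.1))) PySem.Set.empty)
        (fun x => x) false).map
      (fun j => PySem.List.pyGetD (sentences.map PySem.Str.strip) j "")
    = (sentences.filter (fun s => kws.any (fun k => PySem.Str.isIn k s))).map PySem.Str.strip := by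
  have hTpw : (((PySem.List.enumerate sentences 0).filter
      (fun js => kws.any (fun k => PySem.Str.isIn k js.2))).map (fun js => js.1)).Pairwise
      (fun a b => a < b) :=
    List.pairwise_map.mpr
      (List.Pairwise.sublist List.filter_sublist (PySem.List.pairwise_lt_enumerate _ _))
  have hTnd : (((PySem.List.enumerate sentences 0).filter
      (fun js => kws.any (fun k => PySem.Str.isIn k js.2))).map (fun js => js.1)).Nodup :=
    hTpw.imp (fun hab => ne_of_lt hab)
  have hUnd : (kws.foldl (fun (u : PySem.Set Int) k =>
      PySem.Set.update u (((PySem.List.enumerate sentences 0).filter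
        (fun js => PySem.Str.isIn k js.2)).map (fun js => js.1))) PySem.Set.empty).Nodup :=
    pv_union_nodup _ _ _ List.nodup_nil
  have hmem : ∀ j : Int, j ∈ (((PySem.List.enumerate sentences 0).filter
      (fun js => kws.any (fun k => PySem.Str.isIn k js.2))).map (fun js => js.1))
      ↔ j ∈ (kws.foldl (fun (u : PySem.Set Int) k =>
          PySem.Set.update u (((PySem.List.enumerate sentences 0).filter
            (fun js => PySem.Str.isIn k js.2)).map (fun js => js.1))) PySem.Set.empty) := by
    intro j
    rw [pv_union_mem]
    simp only [List.mem_map, List.mem_filter, List.any_eq_true, PySem.Set.empty,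
      List.not_mem_nil, false_or]
    constructor
    · rintro ⟨js, ⟨hjs, k, hk, hin⟩, rfl⟩
      exact ⟨k, hk, js, ⟨hjs, hin⟩, rfl⟩
    · rintro ⟨k, hk, js, ⟨hjs, hin⟩, rfl⟩
      exact ⟨js, ⟨hjs, k, hk, hin⟩, rfl⟩
  have hperm : (((PySem.List.enumerate sentences 0).filter
      (fun js => kws.any (fun k => PySem.Str.isIn k js.2))).map (fun js => js.1)).Perm
      (kws.foldl (fun (u : PySem.Set Int) k =>
        PySem.Set.update u (((PySem.List.enumerate sentences 0).filter
          (fun js => PySem.Str.isIn k js.2)).map (fun js => js.1))) PySem.Set.empty) :=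
    (List.perm_ext_iff_of_nodup hTnd hUnd).mpr hmem
  have hsor : PySem.List.sorted
      (kws.foldl (fun (u : PySem.Set Int) k =>
        PySem.Set.update u (((PySem.List.enumerate sentences 0).filter
          (fun js => PySem.Str.isIn k js.2)).map (fun js => js.1))) PySem.Set.empty)
      (fun x => x) false
      = ((PySem.List.enumerate sentences 0).filter
          (fun js => kws.any (fun k => PySem.Str.isIn k js.2))).map (fun js => js.1) :=
    PySem.List.sorted_eq_of_perm_of_pairwise_lt _ _ _ hperm hTpw
  rw [hsor, List.map_map]
  have hcong : ∀ js ∈ (PySem.List.enumerate sentences 0).filter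
      (fun js => kws.any (fun k => PySem.Str.isIn k js.2)),
      ((fun j => PySem.List.pyGetD (sentences.map PySem.Str.strip) j "") ∘ fun js => js.1) js
        = PySem.Str.strip js.2 := by
    intro js hjs
    have hjs' := List.mem_of_mem_filter hjs
    rw [PySem.List.mem_enumerate_iff] at hjs'
    obtain ⟨i, hi, rfl⟩ := hjs'
    simp only [Function.comp_apply, zero_add]
    rw [PySem.List.pyGetD_natCast]
    rw [List.getD_eq_getElem _ _ (by simpa using hi)]
    simp
  rw [List.map_congr_left hcong]
  exact pv_enum_filter (fun s => kws.any fun k => PySem.Str.isIn k s) PySem.Str.strip sentences 0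

theorem extract_aspect_sentences_eq (reviews : String)
    (ak : List (String × List String)) (h : (ak.map Prod.fst).Nodup) :
    extract_aspect_sentences reviews ak = extract_aspect_sentences_alt reviews ak := by
  simp only [extract_aspect_sentences, extract_aspect_sentences_alt]
  set sentences : List String :=
    (PySem.Chars.splitOn (PySem.Str.replace reviews "\n" " ").toList ".".toList).map String.ofList
    with hs
  set hits : String → List Int := fun k =>
    ((PySem.List.enumerate sentences 0).filter (fun js => PySem.Str.isIn k js.2)).map
      (fun js => js.1) with hhits
  have hfun : (fun (result : PySem.Dict String String) (p : String × List String) =>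
      if ((sentences.filter (fun s => p.2.any (fun k => PySem.Str.isIn k s))).map PySem.Str.strip).length = 0 then
        result.insert p.1 "관련 의견이 다양합니다."
      else
        result.insert p.1 (PySem.Str.slice (PySem.Str.join " "
          ((sentences.filter (fun s => p.2.any (fun k => PySem.Str.isIn k s))).map PySem.Str.strip)) none (some 300)))
      = (fun (result : PySem.Dict String String) (p : String × List String) =>
          result.insert p.1
            (if ((sentences.filter (fun s => p.2.any (fun k => PySem.Str.isIn k s))).map PySem.Str.strip).length = 0
             then "관련 의견이 다양합니다."
             else PySem.Str.slice (PySem.Str.join " "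
               ((sentences.filter (fun s => p.2.any (fun k => PySem.Str.isIn k s))).map PySem.Str.strip)) none (some 300))) := by
    funext result p
    split_ifs <;> rfl
  rw [hfun]
  rw [PySem.Dict.items_foldl_insert_fresh ak Prod.fst _ PySem.Dict.empty (by simp) h,
    PySem.Dict.items_foldl_insert_fresh ak Prod.fst _ PySem.Dict.empty (by simp) h]
  simp only [pv_items_empty, List.nil_append]
  apply List.map_congr_left
  intro p hp
  have hpost : ∀ k ∈ p.2,
      ((PySem.List.dedup (ak.flatMap (fun p => p.2))).foldl
        (fun d k => d.insert k (hits k)) PySem.Dict.empty).getD k [] = hits k := by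
    intro k hk
    exact pv_postings_getD _ hits (PySem.List.nodup_dedup _) k
      (by rw [PySem.List.dedup_eq_ofList, PySem.Set.mem_ofList]
          exact List.mem_flatMap.mpr ⟨p, hp, hk⟩)
  have hu : p.2.foldl (fun (u : PySem.Set Int) k =>
        PySem.Set.update u (((PySem.List.dedup (ak.flatMap (fun p => p.2))).foldl
          (fun d k => d.insert k (hits k)) PySem.Dict.empty).getD k [])) PySem.Set.empty
      = p.2.foldl (fun (u : PySem.Set Int) k => PySem.Set.update u (hits k)) PySem.Set.empty := by
    apply PySem.List.foldl_congr_mem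
    intro u k hk
    rw [hpost k hk]
  rw [hu]
  have hmap : (PySem.List.sorted
      (p.2.foldl (fun (u : PySem.Set Int) k => PySem.Set.update u (hits k)) PySem.Set.empty)
      (fun x => x) false).map
        (fun j => PySem.List.pyGetD (sentences.map PySem.Str.strip) j "")
      = (sentences.filter (fun s => p.2.any (fun k => PySem.Str.isIn k s))).map PySem.Str.strip :=
    pv_aspect_eq sentences p.2
  rw [← hmap]
  by_cases hnil : PySem.List.sorted
      (p.2.foldl (fun (u : PySem.Set Int) k => PySem.Set.update u (hits k)) PySem.Set.empty)
      (fun x => x) false = []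
  · have h0 : ((PySem.List.sorted
        (p.2.foldl (fun (u : PySem.Set Int) k => PySem.Set.update u (hits k)) PySem.Set.empty)
        (fun x => x) false).map
          (fun j => PySem.List.pyGetD (sentences.map PySem.Str.strip) j "")).length = 0 := by
      rw [hnil]; rfl
    rw [if_pos h0, if_pos hnil]
  · have h0 : ¬ ((PySem.List.sorted
        (p.2.foldl (fun (u : PySem.Set Int) k => PySem.Set.update u (hits k)) PySem.Set.empty)
        (fun x => x) false).map
          (fun j => PySem.List.pyGetD (sentences.map PySem.Str.strip) j "")).length = 0 := by
      intro h0
      exact hnil (List.map_eq_nil_iff.mp (List.length_eq_zero_iff.mp h0))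
    rw [if_neg h0, if_neg hnil]

-- ===== VERDICT (by name: the statement is the Claim_ definition above) =====
theorem extract_aspect_sentences_spec : Claim_equal_extract_aspect_sentences := by
  intro reviews ak _ hpre
  unfold Spec_extract_aspect_sentences
  exact extract_aspect_sentences_eq reviews ak hpre
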